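-- pv_equiv track=rewrite | github.com/DigiScore/neoscore | doc/utils.py | at_line_beginning
-- ===== SOURCE A (Python) =====
-- def at_line_beginning(string, index):
--     if index == 0:
--         return True
--     for i in range(index - 1, -1, -1):
--         if string[i] == "\n":
--             return True
--         elif string[i] == " ":
--             continue
--         else:
--             return False
--     return True
-- ===== SOURCE B (Python) =====
-- def at_line_beginning(string, index):
--     if index <= 0:
--         return True
--     trimmed = string[:index].rstrip(" ")
--     return trimmed == "" or trimmed.endswith("\n")
-- ===== Notes on version B (the rewrite author's own statement) =====
-- stated objective: simpler
-- what changed: A scans characters backwards one index at a time with a three-way branch; B is loop-free: it slices the prefix string[:index], strips trailing spaces with rstrip(' '), and returns whether the result is empty or ends with a newline.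
import Mathlib
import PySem

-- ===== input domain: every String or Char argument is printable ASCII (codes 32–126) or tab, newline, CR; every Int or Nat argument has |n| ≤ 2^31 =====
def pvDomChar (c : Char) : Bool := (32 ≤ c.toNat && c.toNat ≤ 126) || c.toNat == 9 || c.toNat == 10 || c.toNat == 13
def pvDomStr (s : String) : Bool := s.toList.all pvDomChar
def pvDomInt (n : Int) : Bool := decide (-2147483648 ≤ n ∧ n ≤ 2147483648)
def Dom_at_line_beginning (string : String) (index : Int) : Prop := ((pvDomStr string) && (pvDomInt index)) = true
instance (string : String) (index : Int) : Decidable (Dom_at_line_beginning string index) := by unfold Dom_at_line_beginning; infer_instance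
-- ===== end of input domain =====

-- B replaces A's backward index loop with a loop-free slice + rstrip(" ") + endswith("\n") check (simpler decomposition).

-- ===== PORT A =====
-- the 'for i in range(index-1, -1, -1)' loop with its early returns; 'none' from pyGet?
-- is Python's IndexError (excluded by Pre_), false is returned there arbitrarily
def atlbLoop (s : List Char) : List Int → Bool
  | [] => true
  | i :: rest =>
    match PySem.List.pyGet? s i with
    | none => false
    | some c =>
      if c = '\n' then true
      else if c = ' ' then atlbLoop s rest
      else false

def at_line_beginning (string : String) (index : Int) : Bool :=
  if index = 0 then true
  else atlbLoop string.toList (PySem.List.pyRange (index - 1) (-1) (-1))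

-- ===== PORT B =====
def at_line_beginning_alt (string : String) (index : Int) : Bool :=
  if index ≤ 0 then true
  else
    let pre := PySem.List.slice string.toList none (some index)
    -- s.rstrip(" "): PySem has no chars-argument rstrip, so it is ported by hand,
    -- exact on all inputs: drop the given chars from the right end only
    let trimmed := (pre.reverse.dropWhile (fun c => [' '].contains c)).reverse
    trimmed.isEmpty || PySem.Chars.endswith trimmed ['\n']

-- ===== PRECONDITION & SPEC =====
-- Pre_ excludes exactly index > len(string), where A raises IndexError (string[i] out of range)
def Pre_at_line_beginning (string : String) (index : Int) : Prop :=
  index ≤ (string.toList.length : Int)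
instance (string : String) (index : Int) : Decidable (Pre_at_line_beginning string index) := by
  unfold Pre_at_line_beginning; infer_instance

def pvWitness_at_line_beginning : String × Int := ("a\n  b", 3)

def Spec_at_line_beginning (string : String) (index : Int) (out : Bool) : Prop := out = at_line_beginning_alt string index
instance (string : String) (index : Int) (out : Bool) : Decidable (Spec_at_line_beginning string index out) := by unfold Spec_at_line_beginning; infer_instance

-- ===== CLAIM (what is proved, stated in full; the proofs are below) =====
def Claim_equal_at_line_beginning : Prop := ∀ (string : String) (index : Int), Dom_at_line_beginning string index → Pre_at_line_beginning string index → Spec_at_line_beginning string index (at_line_beginning string index)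

-- ===== LEMMAS AND PROOFS =====

-- A's loop on indices n-1 … 0 inspects the reversed prefix: skip spaces, then
-- succeed iff nothing or a newline remains
lemma atlbLoop_eq (L : List Char) (n : Nat) (h : n ≤ L.length) :
    atlbLoop L (PySem.List.pyRange ((n : Int) - 1) (-1) (-1)) =
      (match ((L.take n).reverse).dropWhile (· = ' ') with
        | [] => true
        | c :: _ => c = '\n') := by
  induction n with
  | zero =>
    rw [PySem.List.pyRange_neg_one_eq_nil (by omega)]
    simp [atlbLoop]
  | succ n ih =>
    have hn : n < L.length := by omega
    have hcast : ((n : Int) + 1 - 1) = (n : Int) := by ring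
    rw [show ((n + 1 : Nat) : Int) = (n : Int) + 1 by push_cast; ring, hcast,
      PySem.List.pyRange_neg_one_cons (by omega)]
    have hget : PySem.List.pyGet? L (n : Int) = some L[n] := by
      simp [PySem.List.pyGet?, PySem.List.pyIdx?, hn]
    have htake : L.take (n+1) = L.take n ++ [L[n]] := by
      rw [List.take_add_one]; simp [List.getElem?_eq_getElem hn]
    rw [atlbLoop, hget, htake]
    simp only [List.reverse_append, List.reverse_cons, List.reverse_nil, List.nil_append,
      List.cons_append, List.dropWhile_cons]
    by_cases h1 : L[n] = '\n'
    · simp [h1]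
    · by_cases h2 : L[n] = ' '
      · simp [h2, ih (by omega)]
      · simp [h1, h2]

-- a singleton ['\n'] is a suffix of t ++ [c] exactly when c is the newline
lemma endswith_concat_newline (t : List Char) (c : Char) :
    PySem.Chars.endswith (t ++ [c]) ['\n'] = decide (c = '\n') := by
  by_cases hc : c = '\n'
  · subst hc
    simp [(PySem.Chars.endswith_iff _ _).mpr (List.suffix_append t ['\n'])]
  · simp only [decide_eq_false hc]
    rw [Bool.eq_false_iff]
    intro hcon
    obtain ⟨s, hs⟩ := (PySem.Chars.endswith_iff _ _).mp hcon
    have := congrArg List.getLast? hs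
    simp at this
    exact hc this.symm

-- B's body on a prefix P equals the space-skipping shape A's loop computes
lemma alt_shape (P : List Char) :
    (((P.reverse.dropWhile (fun c => [' '].contains c)).reverse).isEmpty
      || PySem.Chars.endswith ((P.reverse.dropWhile (fun c => [' '].contains c)).reverse) ['\n']) =
      (match P.reverse.dropWhile (· = ' ') with
        | [] => true
        | c :: _ => c = '\n') := by
  have hp : (fun c : Char => [' '].contains c) = (fun c : Char => decide (c = ' ')) := by
    funext c
    by_cases h : c = ' ' <;> simp [h]
  rw [hp]
  cases hr : P.reverse.dropWhile (fun c : Char => decide (c = ' ')) with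
  | nil => simp
  | cons c t => simp [endswith_concat_newline]

-- ===== VERDICT (by name: the statement is the Claim_ definition above) =====
theorem at_line_beginning_spec : Claim_equal_at_line_beginning := by
  intro s i _hd hp
  unfold Spec_at_line_beginning at_line_beginning at_line_beginning_alt
  by_cases h0 : i ≤ 0
  · rw [if_pos h0]
    by_cases hz : i = 0
    · rw [if_pos hz]
    · rw [if_neg hz, PySem.List.pyRange_neg_one_eq_nil (by omega)]; rfl
  · rw [if_neg h0, if_neg (by omega : ¬ i = 0)]
    obtain ⟨n, rfl⟩ : ∃ n : Nat, i = (n : Int) := ⟨i.toNat, (Int.toNat_of_nonneg (by omega)).symm⟩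
    have hn : n ≤ s.toList.length := by
      unfold Pre_at_line_beginning at hp; exact_mod_cast hp
    rw [atlbLoop_eq s.toList n hn, PySem.List.slice_to_natCast]
    exact (alt_shape (s.toList.take n)).symm
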